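-- pv_equiv track=rewrite | github.com/acoli-repo/acoli-corpora | biblical/api/retrieve.py | get_closest_strings
-- ===== SOURCE A (Python) =====
-- def get_closest_strings(goal,cands):
--     """ unigram similarity """
--     if goal in cands:
--         return [goal]
--
--     result=[]
--     sim=0
--     for cand in cands:
--         mysim=0
--         for x in goal:
--             if x in cand:
--                 mysim+=1
--         if mysim>sim:
--             result=[]
--             sim=mysim
--         if mysim==sim:
--             result.append(cand)
--
--     return result
-- ===== SOURCE B (Python) =====
-- def get_closest_strings(goal, cands):
--     """ unigram similarity """
--     if goal in cands:
--         return [goal]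
--     if not cands:
--         return []
--     scores = [sum(1 for x in goal if x in cand) for cand in cands]
--     best = max(scores)
--     return [cand for cand, s in zip(cands, scores) if s == best]
-- ===== Notes on version B (the rewrite author's own statement) =====
-- stated objective: simpler
-- what changed: Replaces A's single interleaved running-max/reset-and-append loop with a two-pass decomposition: build a score table, take its max, then filter the candidates whose score equals the max.
import Mathlib
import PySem

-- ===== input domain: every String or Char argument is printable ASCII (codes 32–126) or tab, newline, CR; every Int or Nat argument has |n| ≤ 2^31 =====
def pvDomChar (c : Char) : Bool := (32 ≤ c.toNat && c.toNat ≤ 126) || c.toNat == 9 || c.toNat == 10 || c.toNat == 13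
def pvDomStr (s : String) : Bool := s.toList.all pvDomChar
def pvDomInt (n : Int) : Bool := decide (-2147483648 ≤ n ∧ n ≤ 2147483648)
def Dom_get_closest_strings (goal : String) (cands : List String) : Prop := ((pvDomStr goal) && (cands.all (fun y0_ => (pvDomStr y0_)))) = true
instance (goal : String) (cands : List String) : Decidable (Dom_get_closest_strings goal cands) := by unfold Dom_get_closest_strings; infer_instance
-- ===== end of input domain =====

-- B replaces A's interleaved running-max/reset loop by score-table + max + filter (objective: simpler).

-- ===== PORT A =====
-- inner loop: for x in goal: if x in cand: mysim += 1   (x is a 1-char string, so 'x in cand' is char membership)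
def pvScoreA (goal cand : String) : Nat :=
  goal.toList.foldl (fun m x => if cand.toList.contains x then m + 1 else m) 0

def get_closest_strings (goal : String) (cands : List String) : List String :=
  if cands.contains goal then [goal]
  else
    (cands.foldl (fun (st : List String × Nat) cand =>
      let mysim := pvScoreA goal cand
      let st := if mysim > st.2 then (([] : List String), mysim) else st
      if mysim = st.2 then (st.1 ++ [cand], st.2) else st) (([] : List String), 0)).1

-- ===== PORT B =====
-- score(cand) = sum(1 for x in goal if x in cand)
def pvScoreB (goal cand : String) : Nat :=
  goal.toList.countP (fun x => cand.toList.contains x)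

def get_closest_strings_alt (goal : String) (cands : List String) : List String :=
  if cands.contains goal then [goal]
  else if cands.isEmpty then []
  else
    let scores := cands.map (pvScoreB goal)
    let best := scores.foldl max 0
    ((cands.zip scores).filter (fun p => p.2 = best)).map (fun p => p.1)

-- ===== PRECONDITION & SPEC =====
def Spec_get_closest_strings (goal : String) (cands : List String) (out : List String) : Prop := out = get_closest_strings_alt goal cands
instance (goal : String) (cands : List String) (out : List String) : Decidable (Spec_get_closest_strings goal cands out) := by unfold Spec_get_closest_strings; infer_instance

-- ===== CLAIM (what is proved, stated in full; the proofs are below) =====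
def Claim_equal_get_closest_strings : Prop := ∀ (goal : String) (cands : List String), Dom_get_closest_strings goal cands → Spec_get_closest_strings goal cands (get_closest_strings goal cands)

-- ===== LEMMAS AND PROOFS =====

-- A's counting fold equals B's countP
theorem pvCount_aux (p : Char → Bool) (l : List Char) :
    ∀ n : Nat, l.foldl (fun m x => if p x then m + 1 else m) n = n + l.countP p := by
  induction l with
  | nil => simp
  | cons x l ih =>
    intro n
    simp only [List.foldl_cons, List.countP_cons]
    by_cases h : p x = true
    · simp [h, ih]; omega
    · simp [h, ih]

theorem pvScore_eq (goal cand : String) : pvScoreA goal cand = pvScoreB goal cand := by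
  unfold pvScoreA pvScoreB
  simpa using pvCount_aux (fun x => cand.toList.contains x) goal.toList 0

-- running max of scores
def pvF (sc : String → Nat) (s : Nat) (cs : List String) : Nat :=
  cs.foldl (fun a c => max a (sc c)) s

theorem pvF_ge (sc : String → Nat) (s : Nat) (cs : List String) : s ≤ pvF sc s cs := by
  induction cs generalizing s with
  | nil => simp [pvF]
  | cons c cs ih =>
    have := ih (max s (sc c))
    simp only [pvF, List.foldl_cons] at *
    omega

theorem pvF_eq_iff (sc : String → Nat) (s : Nat) (cs : List String) :
    (cs.all (fun c => sc c ≤ s) = true) ↔ pvF sc s cs = s := by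
  induction cs generalizing s with
  | nil => simp [pvF]
  | cons c cs ih =>
    simp only [List.all_cons, Bool.and_eq_true, decide_eq_true_eq, pvF, List.foldl_cons]
    by_cases h : sc c ≤ s
    · have : max s (sc c) = s := by omega
      rw [this]
      exact (iff_of_eq rfl).trans (by simpa [h] using ih s) |>.symm |>.symm
    · constructor
      · intro ⟨h1, _⟩; omega
      · intro he
        have := pvF_ge sc (max s (sc c)) cs
        change pvF sc (max s (sc c)) cs = s at he
        omega

-- invariant of A's loop
theorem pvLoop_inv (sc : String → Nat) (cs : List String) :
    ∀ (res : List String) (s : Nat),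
    cs.foldl (fun (st : List String × Nat) cand =>
      let mysim := sc cand
      let st := if mysim > st.2 then (([] : List String), mysim) else st
      if mysim = st.2 then (st.1 ++ [cand], st.2) else st) (res, s)
    = ((if cs.all (fun c => sc c ≤ s) then res else []) ++
        cs.filter (fun c => sc c = pvF sc s cs), pvF sc s cs) := by
  induction cs with
  | nil => intro res s; simp [pvF]
  | cons c cs ih =>
    intro res s
    have hF : pvF sc s (c :: cs) = pvF sc (max s (sc c)) cs := by
      simp [pvF]
    rw [List.foldl_cons]
    by_cases h1 : sc c > s
    · have hmax : max s (sc c) = sc c := by omega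
      have hge : sc c ≤ pvF sc (sc c) cs := pvF_ge sc (sc c) cs
      have hstep : (let mysim := sc c
          let st := if mysim > (res, s).2 then (([] : List String), mysim) else (res, s)
          if mysim = st.2 then (st.1 ++ [c], st.2) else st)
          = (([c] : List String), sc c) := by
        simp [h1]
      rw [hstep, ih]
      rw [hF, hmax]
      have hall : ¬ ((c :: cs).all (fun x => sc x ≤ s) = true) := by
        simp only [List.all_cons, Bool.and_eq_true, decide_eq_true_eq]
        omega
      rw [if_neg hall]
      by_cases h2 : cs.all (fun x => sc x ≤ sc c) = true
      · have hFe : pvF sc (sc c) cs = sc c := (pvF_eq_iff sc (sc c) cs).mp h2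
        rw [if_pos h2, hFe]
        simp
      · have hFe : pvF sc (sc c) cs ≠ sc c := fun h => h2 ((pvF_eq_iff sc (sc c) cs).mpr h)
        rw [if_neg h2]
        have : sc c ≠ pvF sc (sc c) cs := fun h => hFe h.symm
        simp [this]
    · have hmax : max s (sc c) = s := by omega
      have hge : s ≤ pvF sc s cs := pvF_ge sc s cs
      by_cases h2 : sc c = s
      · have hstep : (let mysim := sc c
            let st := if mysim > (res, s).2 then (([] : List String), mysim) else (res, s)
            if mysim = st.2 then (st.1 ++ [c], st.2) else st)
            = ((res ++ [c] : List String), s) := by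
          simp [h2]
        rw [hstep, ih, hF, hmax]
        by_cases h3 : cs.all (fun x => sc x ≤ s) = true
        · have hFe : pvF sc s cs = s := (pvF_eq_iff sc s cs).mp h3
          have hall : (c :: cs).all (fun x => sc x ≤ s) = true := by
            simp only [List.all_cons, Bool.and_eq_true, decide_eq_true_eq]
            exact ⟨by omega, h3⟩
          rw [if_pos h3, if_pos hall, hFe]
          simp [h2]
        · have hFe : pvF sc s cs ≠ s := fun h => h3 ((pvF_eq_iff sc s cs).mpr h)
          have hall : ¬ ((c :: cs).all (fun x => sc x ≤ s) = true) := by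
            simp only [List.all_cons, Bool.and_eq_true, decide_eq_true_eq]
            tauto
          rw [if_neg h3, if_neg hall]
          have : sc c ≠ pvF sc s cs := by omega
          simp [this]
      · have hstep : (let mysim := sc c
            let st := if mysim > (res, s).2 then (([] : List String), mysim) else (res, s)
            if mysim = st.2 then (st.1 ++ [c], st.2) else st)
            = ((res : List String), s) := by
          simp [h1, h2]
        rw [hstep, ih, hF, hmax]
        have hle : sc c ≤ s := by omega
        have hall : (c :: cs).all (fun x => sc x ≤ s) = cs.all (fun x => sc x ≤ s) := by
          simp [hle]
        rw [hall]
        have : sc c ≠ pvF sc s cs := by omega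
        simp [this]

theorem pv_zip_filter_map (f : String → Nat) (b : Nat) (l : List String) :
    ((l.zip (l.map f)).filter (fun p => p.2 = b)).map (fun p => p.1)
      = l.filter (fun x => f x = b) := by
  induction l with
  | nil => rfl
  | cons x l ih =>
    simp only [List.map_cons, List.zip_cons_cons, List.filter_cons]
    by_cases h : f x = b
    · simp [h, ih]
    · simp [h, ih]

theorem get_closest_strings_spec : Claim_equal_get_closest_strings := by
  intro goal cands _
  show get_closest_strings goal cands = get_closest_strings_alt goal cands
  unfold get_closest_strings get_closest_strings_alt
  by_cases hg : cands.contains goal = true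
  · rw [if_pos hg, if_pos hg]
  · rw [if_neg hg, if_neg hg]
    cases cands with
    | nil => rfl
    | cons c cs =>
      have hsc : pvScoreA goal = pvScoreB goal := funext (fun cand => pvScore_eq goal cand)
      have hinv := pvLoop_inv (pvScoreA goal) (c :: cs) [] 0
      rw [hsc] at hinv
      have hA : ((c :: cs).foldl (fun (st : List String × Nat) cand =>
          let mysim := pvScoreA goal cand
          let st := if mysim > st.2 then (([] : List String), mysim) else st
          if mysim = st.2 then (st.1 ++ [cand], st.2) else st) (([] : List String), 0)).1
          = (c :: cs).filter (fun x => pvScoreB goal x = pvF (pvScoreB goal) 0 (c :: cs)) := by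
      -- rewrite the scorer inside the loop body, then apply the invariant
        rw [show (fun (st : List String × Nat) cand =>
            let mysim := pvScoreA goal cand
            let st := if mysim > st.2 then (([] : List String), mysim) else st
            if mysim = st.2 then (st.1 ++ [cand], st.2) else st)
          = (fun (st : List String × Nat) cand =>
            let mysim := pvScoreB goal cand
            let st := if mysim > st.2 then (([] : List String), mysim) else st
            if mysim = st.2 then (st.1 ++ [cand], st.2) else st) from by rw [hsc]]
        rw [hinv]
        cases h : (c :: cs).all (fun x => pvScoreB goal x ≤ 0) <;> simp
      rw [hA]
      have hbest : ((c :: cs).map (pvScoreB goal)).foldl max 0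
          = pvF (pvScoreB goal) 0 (c :: cs) := by
        rw [List.foldl_map]
        rfl
      simp only [List.isEmpty_cons, Bool.false_eq_true, if_false, hbest]
      rw [pv_zip_filter_map]
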